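-- pv_equiv track=rewrite | github.com/gardiens/Braess-Paradox | SSP CONVEXE ( flux minimal avec  latence convexe en temps lineaire).py | sommetexcesdeficit
-- ===== SOURCE A (Python) =====
-- def recuperergrapheentrantsortant(graphecout):
--     """" Renvoi un graphe qui conteint des tuples avec (listedessommets qui va vers i , listedessommets qui sorts de i)"""
--     graphe={}
--     # Complexité en O(nombre arete + nombre sommet)
--     #Initialisation
--     for i in graphecout:
--         graphe[i]=[[],[]]
--
--
--     # On balaye toutes les arêtes pour obtenir le resultat
--     for i in graphecout:
--         for j in graphecout[i]:
--             graphe[j][0].append(i) # On rajoute l'entrée qui est i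
--             graphe[i][1].append(j) # La sortie
--     return graphe
--
-- def imbalance(flux,m,depart, arrivee ):
--     """" Renvoi le graphe qui contient l'imbalance  du graphe"""
--     # L'imbalance vaut  somme du flux qui rentre- somme  du flux qui sort pour ceux qui sont qui ne sont ni l'entrée ni la sortée
--     #  Sinon il vaut +- m + somme entrée - somme sortie  si c'est le depart ou l'arrivee
--     # C'est le déséquilibre du graphe
--     # Complexité O( nombre arête + nombre sommet)
--     graphe={}
--
--     # Initialisation du graphe
--     for i in flux:
--         if i ==arrivee:
--             graphe[i]=-m
--         elif i== depart:
--             graphe[i]= m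
--         else:
--             graphe[i]=0
--
--
--     grapheentrantsortant= recuperergrapheentrantsortant(flux)
--     for i in flux: # On regarde chaque somet du graphe
--         [entranti,sortanti]=grapheentrantsortant[i] # On récupère les sommets entrant et sortant
--         sommeentranti=0
--         sommesortanti=0 # On calcule séparément les sommes
--         for k in entranti:
--             sommeentranti+=flux[k][i]
--
--         for j in sortanti:
--             sommesortanti+=flux[i][j]
--
--         graphe[i]= graphe[i] + sommeentranti-sommesortanti
--     return graphe
--
-- def sommetexcesdeficit(flux,m,depart,arrivee):
--     """renvoie ([sommetenexces],[sommetendeficit])"""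
--     # Un exces est défini comme un sommet qui a un imbalance >0 et réciproquement pour le deficit
--     # Complexité O( nombre sommet + nombre arête)
--     grapheimbalance= imbalance(flux,m,depart,arrivee)
--
--     sommetexces=[]
--     sommetdeficit=[]
--     for i in grapheimbalance:
--         if grapheimbalance[i]>0:
--             sommetexces.append(i)
--         elif grapheimbalance[i]<0:
--             sommetdeficit.append(i)
--
--     return (sommetexces,sommetdeficit)
-- ===== SOURCE B (Python) =====
-- def sommetexcesdeficit(flux, m, depart, arrivee):
--     """renvoie ([sommetenexces],[sommetendeficit])"""
--     # One pass over the edges instead of building the in/out adjacency index: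
--     # each edge (i -> j, v) moves v units out of i and into j.
--     imbalance = {}
--     for i in flux:
--         if i == arrivee:
--             imbalance[i] = -m
--         elif i == depart:
--             imbalance[i] = m
--         else:
--             imbalance[i] = 0
--     for i in flux:
--         for j in flux[i]:
--             v = flux[i][j]
--             imbalance[i] -= v
--             imbalance[j] += v
--     sommetexces = []
--     sommetdeficit = []
--     for i in imbalance:
--         if imbalance[i] > 0:
--             sommetexces.append(i)
--         elif imbalance[i] < 0:
--             sommetdeficit.append(i)
--     return (sommetexces, sommetdeficit)
-- ===== Notes on version B (the rewrite author's own statement) =====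
-- stated objective: simpler
-- what changed: Replaced the reverse/forward adjacency-index builder plus per-node grouped in/out sums by a single incremental pass over the edges that directly adds each edge's flow to its target's imbalance and subtracts it from its source's.
import Mathlib
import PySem

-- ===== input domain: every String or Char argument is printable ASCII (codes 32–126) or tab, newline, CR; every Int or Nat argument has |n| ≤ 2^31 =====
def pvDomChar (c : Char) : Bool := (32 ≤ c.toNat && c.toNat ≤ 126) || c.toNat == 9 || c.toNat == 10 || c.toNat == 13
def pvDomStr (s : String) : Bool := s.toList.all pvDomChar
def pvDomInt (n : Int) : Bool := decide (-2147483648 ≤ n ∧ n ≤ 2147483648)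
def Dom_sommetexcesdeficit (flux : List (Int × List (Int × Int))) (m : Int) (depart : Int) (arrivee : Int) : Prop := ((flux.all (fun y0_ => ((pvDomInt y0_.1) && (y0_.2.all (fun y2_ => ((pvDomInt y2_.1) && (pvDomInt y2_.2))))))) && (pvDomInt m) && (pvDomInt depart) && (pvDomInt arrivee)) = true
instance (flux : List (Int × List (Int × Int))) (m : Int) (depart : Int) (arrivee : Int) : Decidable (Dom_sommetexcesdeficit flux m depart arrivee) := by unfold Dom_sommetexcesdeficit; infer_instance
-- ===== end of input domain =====

-- B drops A's in/out-adjacency index and per-node grouped sums for a single incremental edge pass (objective: simpler).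

-- B replaces A's in/out-adjacency index and per-node grouped sums by one incremental pass over the edges (objective: simpler).

-- marshalling of the dict-of-dicts argument (shared input conversion, used by both ports and by Pre_)
def pvToDict (flux : List (Int × List (Int × Int))) : PySem.Dict Int (PySem.Dict Int Int) :=
  PySem.Dict.ofList (flux.map (fun p => (p.1, PySem.Dict.ofList p.2)))


-- ===== PORT A =====
-- recuperergrapheentrantsortant + imbalance, transliterated
def pvGrapheES (d : PySem.Dict Int (PySem.Dict Int Int)) : PySem.Dict Int (List Int × List Int) :=
  let g0 := d.items.foldl (fun g p => g.insert p.1 (([] : List Int), ([] : List Int))) PySem.Dict.empty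
  d.items.foldl (fun g p =>
    p.2.items.foldl (fun g q =>
      (g.modify q.1 ([], []) (fun t => (t.1 ++ [p.1], t.2))).modify p.1 ([], []) (fun t => (t.1, t.2 ++ [q.1]))) g) g0

def pvImbalanceA (d : PySem.Dict Int (PySem.Dict Int Int)) (m : Int) (depart : Int) (arrivee : Int) : PySem.Dict Int Int :=
  let g0 := d.items.foldl (fun g p => g.insert p.1 (if p.1 = arrivee then -m else if p.1 = depart then m else 0)) PySem.Dict.empty
  let gES := pvGrapheES d
  d.items.foldl (fun g p =>
    let es := gES.getD p.1 ([], [])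
    let sIn := es.1.foldl (fun s k => s + (d.getD k PySem.Dict.empty).getD p.1 0) 0
    let sOut := es.2.foldl (fun s j => s + (d.getD p.1 PySem.Dict.empty).getD j 0) 0
    g.insert p.1 (g.getD p.1 0 + sIn - sOut)) g0


def sommetexcesdeficit (flux : List (Int × List (Int × Int))) (m : Int) (depart : Int) (arrivee : Int) : List Int × List Int :=
  let g := pvImbalanceA (pvToDict flux) m depart arrivee
  g.items.foldl (fun acc p =>
    if p.2 > 0 then (acc.1 ++ [p.1], acc.2)
    else if p.2 < 0 then (acc.1, acc.2 ++ [p.1]) else acc) ([], [])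

-- ===== PORT B =====
def pvImbalanceB (d : PySem.Dict Int (PySem.Dict Int Int)) (m : Int) (depart : Int) (arrivee : Int) : PySem.Dict Int Int :=
  let g0 := d.items.foldl (fun g p => g.insert p.1 (if p.1 = arrivee then -m else if p.1 = depart then m else 0)) PySem.Dict.empty
  d.items.foldl (fun g p =>
    p.2.items.foldl (fun g q =>
      (g.modify p.1 0 (fun s => s - q.2)).modify q.1 0 (fun s => s + q.2)) g) g0


def sommetexcesdeficit_alt (flux : List (Int × List (Int × Int))) (m : Int) (depart : Int) (arrivee : Int) : List Int × List Int :=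
  let g := pvImbalanceB (pvToDict flux) m depart arrivee
  g.items.foldl (fun acc p =>
    if p.2 > 0 then (acc.1 ++ [p.1], acc.2)
    else if p.2 < 0 then (acc.1, acc.2 ++ [p.1]) else acc) ([], [])

-- ===== PRECONDITION & SPEC =====
-- Pre_ excludes exactly the inputs on which the Python raises KeyError: an edge whose target is not a node (key) of the flux dict.
def Pre_sommetexcesdeficit (flux : List (Int × List (Int × Int))) (m : Int) (depart : Int) (arrivee : Int) : Prop :=
  ∀ p ∈ (pvToDict flux).items, ∀ q ∈ p.2.items, (pvToDict flux).contains q.1 = true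
instance (flux : List (Int × List (Int × Int))) (m : Int) (depart : Int) (arrivee : Int) : Decidable (Pre_sommetexcesdeficit flux m depart arrivee) := by unfold Pre_sommetexcesdeficit; infer_instance
def pvWitness_sommetexcesdeficit : (List (Int × List (Int × Int))) × Int × Int × Int := ([(0, [(0, 2), (1, 3)]), (1, [])], 3, 0, 1)

def Spec_sommetexcesdeficit (flux : List (Int × List (Int × Int))) (m : Int) (depart : Int) (arrivee : Int) (out : List Int × List Int) : Prop := out = sommetexcesdeficit_alt flux m depart arrivee
instance (flux : List (Int × List (Int × Int))) (m : Int) (depart : Int) (arrivee : Int) (out : List Int × List Int) : Decidable (Spec_sommetexcesdeficit flux m depart arrivee out) := by unfold Spec_sommetexcesdeficit; infer_instance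

-- ===== CLAIM (what is proved, stated in full; the proofs are below) =====
def Claim_equal_sommetexcesdeficit : Prop := ∀ (flux : List (Int × List (Int × Int))) (m : Int) (depart : Int) (arrivee : Int), Dom_sommetexcesdeficit flux m depart arrivee → Pre_sommetexcesdeficit flux m depart arrivee → Spec_sommetexcesdeficit flux m depart arrivee (sommetexcesdeficit flux m depart arrivee)

-- ===== LEMMAS AND PROOFS =====
-- flattened edge list (src, tgt, value) in traversal order
def pvEdges (d : PySem.Dict Int (PySem.Dict Int Int)) : List (Int × Int × Int) :=
  d.items.flatMap (fun p => p.2.items.map (fun q => (p.1, q.1, q.2)))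

-- sum of a subtraction of maps
theorem pv_sum_map_sub {α : Type} (l : List α) (f g : α → Int) :
    (l.map (fun e => f e - g e)).sum = (l.map f).sum - (l.map g).sum := by
  induction l with
  | nil => simp
  | cons a t ih => simp [ih]; ring

-- sum over an ite-map is the sum over the filtered list
theorem pv_sum_map_ite {α : Type} (p : α → Bool) (f : α → Int) (l : List α) :
    (l.map (fun e => if p e then f e else 0)).sum = ((l.filter p).map f).sum := by
  induction l with
  | nil => rfl
  | cons a t ih =>
    by_cases h : p a <;> simp [List.filter_cons, h, ih]

-- first-match filter on a fst-nodup pair list is a singleton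
theorem pv_filter_fst_singleton {β : Type} (l : List (Int × β)) (x : Int) (v : β)
    (hn : (l.map (fun p => p.1)).Nodup) (hm : (x, v) ∈ l) :
    l.filter (fun p => p.1 == x) = [(x, v)] := by
  induction l with
  | nil => cases hm
  | cons a t ih =>
    simp only [List.map_cons, List.nodup_cons] at hn
    rcases List.mem_cons.mp hm with h | h
    · subst h
      simp only [List.filter_cons, beq_self_eq_true, if_pos rfl]
      have hnil : t.filter (fun p => p.1 == x) = [] := by
        apply List.filter_eq_nil_iff.mpr
        intro p hp hbe
        have hpx : p.1 = x := by simpa using hbe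
        exact hn.1 (List.mem_map.mpr ⟨p, hp, hpx⟩)
      simp [hnil]
    · have hax : a.1 ≠ x := by
        intro he
        exact hn.1 (List.mem_map.mpr ⟨(x, v), h, he.symm⟩)
      simp [List.filter_cons, hax, ih hn.2 h]

-- B's edge pass: pointwise characterization
theorem pv_getD_Bfold (es : List (Int × Int × Int)) (g : PySem.Dict Int Int) (x : Int) :
    (es.foldl (fun g e => (g.modify e.1 0 (fun s => s - e.2.2)).modify e.2.1 0 (fun s => s + e.2.2)) g).getD x 0
      = g.getD x 0 + (es.map (fun e => (if x = e.2.1 then e.2.2 else 0) - (if x = e.1 then e.2.2 else 0))).sum := by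
  induction es generalizing g with
  | nil => simp
  | cons e t ih =>
    simp only [List.foldl_cons, ih, List.map_cons, List.sum_cons, PySem.Dict.getD_modify]
    clear ih
    split_ifs <;> subst_vars <;> simp_all <;> ring

-- A's adjacency builder: pointwise characterization
theorem pv_getD_ESfold (es : List (Int × Int × Int)) (g : PySem.Dict Int (List Int × List Int)) (x : Int) :
    (es.foldl (fun g e =>
        (g.modify e.2.1 ([], []) (fun t => (t.1 ++ [e.1], t.2))).modify e.1 ([], []) (fun t => (t.1, t.2 ++ [e.2.1]))) g).getD x ([], [])
      = ((g.getD x ([], [])).1 ++ (es.filter (fun e => x == e.2.1)).map (·.1),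
         (g.getD x ([], [])).2 ++ (es.filter (fun e => x == e.1)).map (fun e => e.2.1)) := by
  induction es generalizing g with
  | nil => simp
  | cons e t ih =>
    simp only [List.foldl_cons, ih, PySem.Dict.getD_modify, List.filter_cons]
    clear ih
    split_ifs <;> subst_vars <;> simp_all [List.append_assoc]

-- A's per-node update loop: pointwise characterization
theorem pv_getD_Afold {β : Type} (ks : List (Int × β)) (F1 F2 : (Int × β) → Int) (g : PySem.Dict Int Int) (x : Int) :
    (ks.foldl (fun g p => g.insert p.1 (g.getD p.1 0 + F1 p - F2 p)) g).getD x 0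
      = g.getD x 0 + ((ks.filter (fun p => p.1 == x)).map (fun p => F1 p - F2 p)).sum := by
  induction ks generalizing g with
  | nil => simp
  | cons p t ih =>
    simp only [List.foldl_cons, ih, List.filter_cons]
    by_cases h : x = p.1
    · subst h
      simp [PySem.Dict.getD_insert]
      ring
    · have hb : (p.1 == x) = false := by simpa using Ne.symm h
      simp [PySem.Dict.getD_insert, h, hb]
-- the constant-insert init loop leaves a default read unchanged
theorem pv_getD_init_const {β : Type} (ks : List (Int × β)) (c : List Int × List Int)
    (g : PySem.Dict Int (List Int × List Int)) (x : Int) (h : g.getD x c = c) :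
    (ks.foldl (fun g p => g.insert p.1 c) g).getD x c = c := by
  induction ks generalizing g with
  | nil => exact h
  | cons p t ih =>
    refine ih _ ?_
    rw [PySem.Dict.getD_insert]
    split <;> simp [h]

-- Set.update by elements already present is the identity
theorem pv_set_update_of_subset (xs ys : List Int) (h : ∀ y ∈ ys, y ∈ xs) :
    PySem.Set.update xs ys = xs := by
  induction ys generalizing xs with
  | nil => rfl
  | cons y t ih =>
    have hy : PySem.Set.add xs y = xs := by
      simp [PySem.Set.add, PySem.Set.contains, List.contains_eq_mem, h y (by simp)]
    show List.foldl PySem.Set.add (PySem.Set.add xs y) t = xs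
    rw [hy]
    exact ih xs (fun z hz => h z (by simp [hz]))

-- every value of an ofList dict comes from the list
theorem pv_mem_values_update {κ ν : Type} [BEq κ] [LawfulBEq κ] (l : List (κ × ν)) (d : PySem.Dict κ ν)
    (v : ν) (h : v ∈ (d.update l).values) : v ∈ l.map (·.2) ∨ v ∈ d.values := by
  induction l generalizing d with
  | nil => exact Or.inr h
  | cons p t ih =>
    have : v ∈ t.map (·.2) ∨ v ∈ (d.insert p.1 p.2).values := ih _ h
    rcases this with h' | h'
    · exact Or.inl (by simp [h'])
    · rcases PySem.Dict.mem_values_insert d p.1 p.2 v h' with h'' | h''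
      · exact Or.inl (by simp [h''])
      · exact Or.inr h''

-- keys are unchanged by a fold of paired modifies at keys already present
theorem pv_keys_modpair_fold {ν : Type} (es : List (Int × Int × Int)) (d0 : ν)
    (k1 k2 : Int × Int × Int → Int) (f1 f2 : Int × Int × Int → ν → ν) (g : PySem.Dict Int ν)
    (h : ∀ e ∈ es, k1 e ∈ g.keys ∧ k2 e ∈ g.keys) :
    (es.foldl (fun g e => ((g.modify (k1 e) d0 (f1 e)).modify (k2 e) d0 (f2 e))) g).keys = g.keys := by
  induction es generalizing g with
  | nil => rfl
  | cons e t ih =>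
    have h1 : g.contains (k1 e) = true := (PySem.Dict.contains_iff_mem_keys g (k1 e)).mpr (h e (by simp)).1
    have hk1 : (g.modify (k1 e) d0 (f1 e)).keys = g.keys := by
      rw [PySem.Dict.keys_modify, PySem.Dict.keys_insert_of_contains _ _ h1]
    have h2 : (g.modify (k1 e) d0 (f1 e)).contains (k2 e) = true := by
      rw [PySem.Dict.contains_iff_mem_keys, hk1]
      exact (h e (by simp)).2
    have hk2 : ((g.modify (k1 e) d0 (f1 e)).modify (k2 e) d0 (f2 e)).keys = g.keys := by
      rw [PySem.Dict.keys_modify, PySem.Dict.keys_insert_of_contains _ _ h2, hk1]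
    rw [List.foldl_cons, ih _ (fun e' he' => by rw [hk2]; exact h e' (by simp [he'])), hk2]

-- membership in the flattened edge list
theorem pv_mem_edges (d : PySem.Dict Int (PySem.Dict Int Int)) (e : Int × Int × Int) :
    e ∈ pvEdges d ↔ ∃ p ∈ d.items, ∃ q ∈ p.2.items, e = (p.1, q.1, q.2) := by
  simp only [pvEdges, List.mem_flatMap, List.mem_map]
  constructor
  · rintro ⟨p, hp, q, hq, rfl⟩; exact ⟨p, hp, q, hq, rfl⟩
  · rintro ⟨p, hp, q, hq, rfl⟩; exact ⟨p, hp, q, hq, rfl⟩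

-- inner dicts of a marshalled flux have nodup keys
theorem pv_inner_nodup (flux : List (Int × List (Int × Int))) :
    ∀ p ∈ (pvToDict flux).items, p.2.keys.Nodup := by
  intro p hp
  have hv : p.2 ∈ (pvToDict flux).values := List.mem_map_of_mem hp
  simp only [pvToDict, PySem.Dict.ofList] at hv
  rcases pv_mem_values_update (flux.map (fun p => (p.1, PySem.Dict.empty.update p.2))) PySem.Dict.empty p.2 hv with h | h
  · simp only [List.map_map, List.mem_map] at h
    obtain ⟨q, _, hq⟩ := h
    rw [← hq]
    exact PySem.Dict.nodup_keys_ofList _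
  · simp [PySem.Dict.empty, PySem.Dict.values] at h

-- each edge's value is what the marshalled dict looks up
theorem pv_edge_val (d : PySem.Dict Int (PySem.Dict Int Int)) (hd : d.keys.Nodup)
    (hinner : ∀ p ∈ d.items, p.2.keys.Nodup) :
    ∀ e ∈ pvEdges d, (d.getD e.1 PySem.Dict.empty).getD e.2.1 0 = e.2.2 := by
  intro e he
  obtain ⟨p, hp, q, hq, rfl⟩ := (pv_mem_edges d e).mp he
  have hget : d.get? p.1 = some p.2 := PySem.Dict.get?_of_mem_items d (show ((p.1, p.2) ∈ d.items) by simpa using hp) hd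
  have h1 : d.getD p.1 PySem.Dict.empty = p.2 := by
    rw [PySem.Dict.getD_eq_get?_getD, hget]; rfl
  have h2 : p.2.getD q.1 0 = q.2 :=
    PySem.Dict.getD_of_mem_items p.2 (show ((q.1, q.2) ∈ p.2.items) by simpa using hq) (hinner p hp) 0
  simpa [h1] using h2

-- edge sources are keys
theorem pv_edge_src_mem (d : PySem.Dict Int (PySem.Dict Int Int)) :
    ∀ e ∈ pvEdges d, e.1 ∈ d.keys := by
  intro e he
  obtain ⟨p, hp, q, hq, rfl⟩ := (pv_mem_edges d e).mp he
  exact List.mem_map_of_mem hp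


-- the nested builder loop is the fold over the flattened edge list
theorem pv_ES_eq_edges (d : PySem.Dict Int (PySem.Dict Int Int)) (g : PySem.Dict Int (List Int × List Int)) :
    d.items.foldl (fun g p =>
      p.2.items.foldl (fun g q =>
        (g.modify q.1 ([], []) (fun t => (t.1 ++ [p.1], t.2))).modify p.1 ([], []) (fun t => (t.1, t.2 ++ [q.1]))) g) g
    = (pvEdges d).foldl (fun g e =>
        (g.modify e.2.1 ([], []) (fun t => (t.1 ++ [e.1], t.2))).modify e.1 ([], []) (fun t => (t.1, t.2 ++ [e.2.1]))) g := by
  rw [pvEdges, List.foldl_flatMap]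
  simp [List.foldl_map]

-- B's nested edge loop is the fold over the flattened edge list
theorem pv_B_eq_edges (d : PySem.Dict Int (PySem.Dict Int Int)) (g : PySem.Dict Int Int) :
    d.items.foldl (fun g p =>
      p.2.items.foldl (fun g q =>
        (g.modify p.1 0 (fun s => s - q.2)).modify q.1 0 (fun s => s + q.2)) g) g
    = (pvEdges d).foldl (fun g e =>
        (g.modify e.1 0 (fun s => s - e.2.2)).modify e.2.1 0 (fun s => s + e.2.2)) g := by
  rw [pvEdges, List.foldl_flatMap]
  simp [List.foldl_map]

-- the two imbalance dicts agree
theorem pv_imb_eq (flux : List (Int × List (Int × Int))) (m depart arrivee : Int)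
    (hpre : ∀ p ∈ (pvToDict flux).items, ∀ q ∈ p.2.items, (pvToDict flux).contains q.1 = true) :
    pvImbalanceA (pvToDict flux) m depart arrivee = pvImbalanceB (pvToDict flux) m depart arrivee := by
  set d := pvToDict flux with hdd
  have hd : d.keys.Nodup := PySem.Dict.nodup_keys_ofList _
  have hinner : ∀ p ∈ d.items, p.2.keys.Nodup := pv_inner_nodup flux
  have htgt : ∀ e ∈ pvEdges d, e.2.1 ∈ d.keys := by
    intro e he
    obtain ⟨p, hp, q, hq, rfl⟩ := (pv_mem_edges d e).mp he
    exact (PySem.Dict.contains_iff_mem_keys d _).mp (hpre p hp q hq)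
  have hsrc : ∀ e ∈ pvEdges d, e.1 ∈ d.keys := pv_edge_src_mem d
  have hval : ∀ e ∈ pvEdges d, (d.getD e.1 PySem.Dict.empty).getD e.2.1 0 = e.2.2 := pv_edge_val d hd hinner
  -- the init dict shared by both sides
  set g0 : PySem.Dict Int Int := d.items.foldl (fun g p => g.insert p.1 (if p.1 = arrivee then -m else if p.1 = depart then m else 0)) PySem.Dict.empty with hg0
  have hkeys0 : g0.keys = d.keys := by
    rw [hg0, PySem.Dict.keys_foldl_insert_key d.items (fun p => p.1) _ PySem.Dict.empty]
    have : d.items.map (fun p => p.1) = d.keys := rfl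
    rw [this]
    have hemp : (PySem.Dict.empty : PySem.Dict Int Int).keys = [] := rfl
    rw [hemp]
    show PySem.Set.ofList d.keys = d.keys
    exact PySem.Set.ofList_eq_self_of_nodup d.keys hd
  -- A side in per-node fold form over the shared init dict
  have hA : pvImbalanceA d m depart arrivee
      = d.items.foldl (fun g p => g.insert p.1 (g.getD p.1 0
          + ((pvGrapheES d).getD p.1 ([], [])).1.foldl (fun s j => s + (d.getD j PySem.Dict.empty).getD p.1 0) 0
          - ((pvGrapheES d).getD p.1 ([], [])).2.foldl (fun s j => s + (d.getD p.1 PySem.Dict.empty).getD j 0) 0)) g0 := rfl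
  -- B side in edge-fold form
  have hB : pvImbalanceB d m depart arrivee
      = (pvEdges d).foldl (fun g e => (g.modify e.1 0 (fun s => s - e.2.2)).modify e.2.1 0 (fun s => s + e.2.2)) g0 :=
    pv_B_eq_edges d g0
  have hkeysA : (pvImbalanceA d m depart arrivee).keys = d.keys := by
    rw [hA, PySem.Dict.keys_foldl_insert_key d.items (fun p => p.1) _ g0, hkeys0]
    exact pv_set_update_of_subset _ _ (fun y hy => hy)
  have hkeysB : (pvImbalanceB d m depart arrivee).keys = d.keys := by
    rw [hB, pv_keys_modpair_fold (pvEdges d) 0 (fun e => e.1) (fun e => e.2.1)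
      (fun e s => s - e.2.2) (fun e s => s + e.2.2) g0
      (fun e he => ⟨hkeys0 ▸ hsrc e he, hkeys0 ▸ htgt e he⟩), hkeys0]
  have hpoint : ∀ k ∈ d.keys,
      (pvImbalanceA d m depart arrivee).getD k 0 = (pvImbalanceB d m depart arrivee).getD k 0 := by
    intro k hk
    obtain ⟨nk, hnk⟩ : ∃ nk, d.get? k = some nk := by
      cases h : d.get? k with
      | none => exact absurd ((PySem.Dict.get?_eq_none_iff_not_mem_keys d k).mp h) (by simp [hk])
      | some v => exact ⟨v, rfl⟩
    have hmem : (k, nk) ∈ d.items := PySem.Dict.mem_items_of_get?_eq_some d hnk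
    have hES : (pvGrapheES d).getD k ([], [])
        = (((pvEdges d).filter (fun e => k == e.2.1)).map (fun e => e.1),
           ((pvEdges d).filter (fun e => k == e.1)).map (fun e => e.2.1)) := by
      have hg : pvGrapheES d = (pvEdges d).foldl (fun g e =>
          (g.modify e.2.1 ([], []) (fun t => (t.1 ++ [e.1], t.2))).modify e.1 ([], []) (fun t => (t.1, t.2 ++ [e.2.1])))
          (d.items.foldl (fun g p => g.insert p.1 (([] : List Int), ([] : List Int))) PySem.Dict.empty) :=
        pv_ES_eq_edges d _
      have h0 : (d.items.foldl (fun g p => g.insert p.1 (([] : List Int), ([] : List Int))) PySem.Dict.empty).getD k ([], []) = ([], []) :=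
        pv_getD_init_const d.items ([], []) PySem.Dict.empty k (by simp [pysem])
      rw [hg, pv_getD_ESfold, h0]
      simp
    have hT : ((pvEdges d).map (fun e => if k = e.2.1 then e.2.2 else 0)).sum
        = (((pvEdges d).filter (fun e => k == e.2.1)).map (fun e => e.2.2)).sum := by
      rw [← pv_sum_map_ite]
      apply congrArg
      apply List.map_eq_map_iff.mpr
      intro e _
      by_cases h : k = e.2.1 <;> simp [h]
    have hS : ((pvEdges d).map (fun e => if k = e.1 then e.2.2 else 0)).sum
        = (((pvEdges d).filter (fun e => k == e.1)).map (fun e => e.2.2)).sum := by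
      rw [← pv_sum_map_ite]
      apply congrArg
      apply List.map_eq_map_iff.mpr
      intro e _
      by_cases h : k = e.1 <;> simp [h]
    have hF1 : (((pvGrapheES d).getD k ([], [])).1.foldl (fun s j => s + (d.getD j PySem.Dict.empty).getD k 0) 0)
        = ((pvEdges d).map (fun e => if k = e.2.1 then e.2.2 else 0)).sum := by
      rw [hES, PySem.List.foldl_add, List.map_map, hT]
      simp only [zero_add]
      apply congrArg
      apply List.map_eq_map_iff.mpr
      intro e he
      have he1 : e ∈ pvEdges d := (List.mem_filter.mp he).1
      have he2 : k = e.2.1 := by simpa using (List.mem_filter.mp he).2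
      simp only [Function.comp]
      rw [he2]
      exact hval e he1
    have hF2 : (((pvGrapheES d).getD k ([], [])).2.foldl (fun s j => s + (d.getD k PySem.Dict.empty).getD j 0) 0)
        = ((pvEdges d).map (fun e => if k = e.1 then e.2.2 else 0)).sum := by
      rw [hES, PySem.List.foldl_add, List.map_map, hS]
      simp only [zero_add]
      apply congrArg
      apply List.map_eq_map_iff.mpr
      intro e he
      have he1 : e ∈ pvEdges d := (List.mem_filter.mp he).1
      have he2 : k = e.1 := by simpa using (List.mem_filter.mp he).2
      simp only [Function.comp]
      rw [he2]
      exact hval e he1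
    rw [hA, pv_getD_Afold, pv_filter_fst_singleton d.items k nk hd hmem,
        hB, pv_getD_Bfold, pv_sum_map_sub]
    simp only [List.map_cons, List.map_nil, List.sum_cons, List.sum_nil]
    rw [hF1, hF2, pv_sum_map_sub]
    ring
  apply PySem.Dict.ext
  have hndA : (pvImbalanceA d m depart arrivee).keys.Nodup := by rw [hkeysA]; exact hd
  have hndB : (pvImbalanceB d m depart arrivee).keys.Nodup := by rw [hkeysB]; exact hd
  rw [PySem.Dict.items_eq_map_keys _ hndA 0, PySem.Dict.items_eq_map_keys _ hndB 0, hkeysA, hkeysB]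
  apply List.map_eq_map_iff.mpr
  intro k hk
  rw [hpoint k hk]


-- ===== VERDICT (by name: the statement is the Claim_ definition above) =====
theorem sommetexcesdeficit_spec : Claim_equal_sommetexcesdeficit := by
  intro flux m depart arrivee _ hpre
  show sommetexcesdeficit flux m depart arrivee = sommetexcesdeficit_alt flux m depart arrivee
  simp only [sommetexcesdeficit, sommetexcesdeficit_alt]
  rw [pv_imb_eq flux m depart arrivee hpre]
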